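-- pv_equiv track=rewrite | github.com/skykid17/attacks_on_RSA_d | wiener_attack.py | wiener_attack
-- ===== SOURCE A (Python) =====
-- from math import isqrt
--
-- def cf_expansion(n, d):
--     e = []
--     while d:
--         q = n // d
--         e.append(q)
--         n, d = d, n % d
--     return e
--
-- def convergents(cf):
--     h1, h2 = 1, 0
--     k1, k2 = 0, 1
--     for a in cf:
--         h = a * h1 + h2
--         k = a * k1 + k2
--         yield h, k
--         h2, h1 = h1, h
--         k2, k1 = k1, k
--
-- def wiener_attack(n, e):
--     cf = cf_expansion(e, n)
--     for k, d in convergents(cf):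
--         if k == 0:
--             continue
--         if (e * d - 1) % k == 0:
--             phi = (e * d - 1) // k
--             s = n - phi + 1
--             discriminant = s * s - 4 * n
--             if discriminant >= 0:
--                 sqrt_disc = isqrt(discriminant)
--                 if sqrt_disc * sqrt_disc == discriminant:
--                     p = (s + sqrt_disc) // 2
--                     q = (s - sqrt_disc) // 2
--                     if p * q == n:
--                         return max(p, q), min(p, q), d
--     return None
-- ===== SOURCE B (Python) =====
-- from math import isqrt
--
-- def wiener_attack(n, e):
--     # Build the continued-fraction quotients of e/n, then derive each convergent
--     # independently by evaluating its prefix BACK-TO-FRONT (no forward h/k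
--     # recurrence, no carried convergent state).
--     quotients = []
--     a, b = e, n
--     while b:
--         quotients.append(a // b)
--         a, b = b, a % b
--     for i in range(len(quotients)):
--         num, den = quotients[i], 1
--         for q in reversed(quotients[:i]):
--             num, den = q * num + den, num
--         k, d = num, den
--         if k != 0 and (e * d - 1) % k == 0:
--             phi = (e * d - 1) // k
--             s = n - phi + 1
--             disc = s * s - 4 * n
--             if disc >= 0:
--                 r = isqrt(disc)
--                 if r * r == disc:
--                     p, q2 = (s + r) // 2, (s - r) // 2
--                     if p * q2 == n:
--                         return max(p, q2), min(p, q2), d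
--     return None
-- ===== Notes on version B (the rewrite author's own statement) =====
-- stated objective: alternative
-- what changed: B drops A's forward h/k convergent recurrence (and its generator) entirely: it builds the quotient list once and then computes each convergent independently by evaluating its continued-fraction prefix back-to-front, keeping no convergent state across iterations.
import Mathlib
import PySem

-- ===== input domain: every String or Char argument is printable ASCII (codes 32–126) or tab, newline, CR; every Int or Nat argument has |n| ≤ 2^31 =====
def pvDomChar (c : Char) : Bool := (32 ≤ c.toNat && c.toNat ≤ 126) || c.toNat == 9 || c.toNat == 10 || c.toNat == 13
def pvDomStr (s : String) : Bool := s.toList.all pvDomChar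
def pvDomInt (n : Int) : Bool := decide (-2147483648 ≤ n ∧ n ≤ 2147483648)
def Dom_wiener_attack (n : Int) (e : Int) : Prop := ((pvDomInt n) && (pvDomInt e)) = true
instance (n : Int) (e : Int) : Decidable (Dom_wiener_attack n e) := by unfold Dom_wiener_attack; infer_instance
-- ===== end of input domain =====

-- B replaces A's forward h/k convergent recurrence by an independent back-to-front
-- evaluation of each continued-fraction prefix; objective: alternative algorithm.

-- Termination measure for Python's Euclid step (divisor-signed mod): |n % d| < |d| for d ≠ 0.
theorem pvModNatAbsLt (n d : Int) (hd : d ≠ 0) :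
    (PySem.Int.mod n d).natAbs < d.natAbs := by
  rcases lt_or_gt_of_ne hd with h | h
  · have := PySem.Int.mod_neg_bounds n (b := d) h; omega
  · have h1 := PySem.Int.mod_nonneg n (b := d) h
    have h2 := PySem.Int.mod_lt n (b := d) h
    omega

-- ===== PORT A =====
-- cf_expansion(n, d): the full quotient list of the continued fraction.
def cfExpansion (n d : Int) : List Int :=
  if hd : d = 0 then []
  else PySem.Int.floordiv n d :: cfExpansion d (PySem.Int.mod n d)
termination_by d.natAbs
decreasing_by exact pvModNatAbsLt n d hd

-- body of A's for-loop for one convergent (k, d) = (h, k): the candidate test.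
def wienerCheckA (n e h k : Int) : Option (Int × Int × Int) :=
  if h = 0 then none
  else if PySem.Int.mod (e * k - 1) h = 0 then
    let phi := PySem.Int.floordiv (e * k - 1) h
    let s := n - phi + 1
    let discriminant := s * s - 4 * n
    if discriminant ≥ 0 then
      let sqrtDisc : Int := Int.ofNat (Nat.sqrt discriminant.toNat)  -- math.isqrt, exact for discriminant ≥ 0
      if sqrtDisc * sqrtDisc = discriminant then
        let p := PySem.Int.floordiv (s + sqrtDisc) 2
        let q := PySem.Int.floordiv (s - sqrtDisc) 2
        if p * q = n then some (max p q, min p q, k) else none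
      else none
    else none
  else none

-- A's for-loop over the quotients (the 'convergents' generator inlined),
-- carrying the forward convergent state h1,h2,k1,k2.
def wienerLoopA (n e : Int) (cf : List Int) (h1 h2 k1 k2 : Int) : Option (Int × Int × Int) :=
  match cf with
  | [] => none
  | a :: rest =>
    let h := a * h1 + h2
    let k := a * k1 + k2
    match wienerCheckA n e h k with
    | some r => some r
    | none => wienerLoopA n e rest h h1 k k1

def wiener_attack (n : Int) (e : Int) : Option (Int × Int × Int) :=
  wienerLoopA n e (cfExpansion e n) 1 0 0 1

-- ===== PORT B =====
-- B's quotient-building while loop (Source B builds the list inline).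
def cfQuotients (a b : Int) : List Int :=
  if hb : b = 0 then []
  else PySem.Int.floordiv a b :: cfQuotients b (PySem.Int.mod a b)
termination_by b.natAbs
decreasing_by exact pvModNatAbsLt a b hb

-- B's inner loop: num,den = quotients[i],1; for q in reversed(quotients[:i]): num,den = q*num+den, num.
-- quotients[i] is always in range (i < len), so getD is exact here.
def backPair (cf : List Int) (i : Nat) : Int × Int :=
  ((cf.take i).reverse).foldl (fun nd q => (q * nd.1 + nd.2, nd.1)) (cf.getD i 0, 1)

-- B's combined candidate test (one 'and' condition, as in Source B).
def wienerCheckB (n e k d : Int) : Option (Int × Int × Int) :=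
  if k ≠ 0 ∧ PySem.Int.mod (e * d - 1) k = 0 then
    let phi := PySem.Int.floordiv (e * d - 1) k
    let s := n - phi + 1
    let disc := s * s - 4 * n
    if disc ≥ 0 then
      let r : Int := Int.ofNat (Nat.sqrt disc.toNat)  -- math.isqrt, exact for disc ≥ 0
      if r * r = disc then
        let p := PySem.Int.floordiv (s + r) 2
        let q2 := PySem.Int.floordiv (s - r) 2
        if p * q2 = n then some (max p q2, min p q2, d) else none
      else none
    else none
  else none

-- B's outer for-loop over the indices i in range(len(quotients)).
def wienerLoopB (n e : Int) (cf : List Int) : List Nat → Option (Int × Int × Int)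
  | [] => none
  | i :: rest =>
    let nd := backPair cf i
    match wienerCheckB n e nd.1 nd.2 with
    | some r => some r
    | none => wienerLoopB n e cf rest

def wiener_attack_alt (n : Int) (e : Int) : Option (Int × Int × Int) :=
  let cf := cfQuotients e n
  wienerLoopB n e cf (List.range cf.length)

-- ===== PRECONDITION & SPEC =====
def Spec_wiener_attack (n : Int) (e : Int) (out : Option (Int × Int × Int)) : Prop := out = wiener_attack_alt n e
instance (n : Int) (e : Int) (out : Option (Int × Int × Int)) : Decidable (Spec_wiener_attack n e out) := by unfold Spec_wiener_attack; infer_instance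

-- ===== CLAIM (what is proved, stated in full; the proofs are below) =====
def Claim_equal_wiener_attack : Prop := ∀ (n : Int) (e : Int), Dom_wiener_attack n e → Spec_wiener_attack n e (wiener_attack n e)

-- ===== LEMMAS AND PROOFS =====

theorem cfQuotients_eq : ∀ (m : Nat) (a b : Int), b.natAbs = m → cfQuotients a b = cfExpansion a b := by
  intro m
  induction m using Nat.strong_induction_on with
  | _ m ih =>
    intro a b hm
    by_cases hb : b = 0
    · subst hb; rw [cfQuotients, cfExpansion]; simp
    · rw [cfQuotients, cfExpansion]
      simp only [hb, dif_neg, not_false_iff]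
      rw [ih (PySem.Int.mod a b).natAbs (hm ▸ pvModNatAbsLt a b hb) _ _ rfl]

theorem check_eq (n e h k : Int) : wienerCheckA n e h k = wienerCheckB n e h k := by
  unfold wienerCheckA wienerCheckB
  by_cases h0 : h = 0 <;> simp [h0]

-- forward state fold over a quotient list (A's carried state).
def fwdAux (l : List Int) (st : Int × Int × Int × Int) : Int × Int × Int × Int :=
  l.foldl (fun s a => (a * s.1 + s.2.1, s.1, a * s.2.2.1 + s.2.2.2, s.2.2.1)) st

-- back-to-front evaluation of the prefix l followed by a (B's inner loop).
def backEval (l : List Int) (a : Int) : Int × Int :=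
  l.reverse.foldl (fun nd q => (q * nd.1 + nd.2, nd.1)) (a, 1)

theorem backEval_cons (x : Int) (l : List Int) (a : Int) :
    backEval (x :: l) a = (x * (backEval l a).1 + (backEval l a).2, (backEval l a).1) := by
  unfold backEval
  rw [List.reverse_cons, List.foldl_append]
  rfl

-- The matrix identity: the forward current pair after l ++ [a] from any initial
-- state equals the back-to-front evaluation of l ++ [a] combined linearly with it.
theorem fwd_back (l : List Int) (a : Int) : ∀ (h1 h2 k1 k2 : Int),
    (fwdAux (l ++ [a]) (h1, h2, k1, k2)).1
      = (backEval l a).1 * h1 + (backEval l a).2 * h2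
    ∧ (fwdAux (l ++ [a]) (h1, h2, k1, k2)).2.2.1
      = (backEval l a).1 * k1 + (backEval l a).2 * k2 := by
  induction l with
  | nil =>
    intro h1 h2 k1 k2
    simp [fwdAux, backEval]
  | cons x l ih =>
    intro h1 h2 k1 k2
    have h := ih (x * h1 + h2) h1 (x * k1 + k2) k1
    rw [backEval_cons]
    have hfold : fwdAux ((x :: l) ++ [a]) (h1, h2, k1, k2)
        = fwdAux (l ++ [a]) (x * h1 + h2, h1, x * k1 + k2, k1) := rfl
    rw [hfold, h.1, h.2]
    constructor <;> ring

-- B's backPair at an in-range index is the back-to-front evaluation of take (i+1).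
theorem backPair_eq (cf : List Int) (i : Nat) (hi : i < cf.length) :
    backPair cf i = backEval (cf.take i) cf[i] := by
  unfold backPair backEval
  rw [List.getD_eq_getElem cf 0 hi]

-- Main loop correspondence: A's loop on the suffix (with its state the forward
-- fold of the consumed prefix) equals B's loop on the remaining indices.
theorem loops (n e : Int) : ∀ (m j : Nat) (cf : List Int), cf.length = j + m →
    wienerLoopA n e (cf.drop j)
      (fwdAux (cf.take j) (1, 0, 0, 1)).1
      (fwdAux (cf.take j) (1, 0, 0, 1)).2.1
      (fwdAux (cf.take j) (1, 0, 0, 1)).2.2.1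
      (fwdAux (cf.take j) (1, 0, 0, 1)).2.2.2
      = wienerLoopB n e cf (List.range' j m) := by
  intro m
  induction m with
  | zero =>
    intro j cf hlen
    have hd : cf.drop j = [] := List.drop_eq_nil_of_le (by omega)
    rw [hd]
    rfl
  | succ m ih =>
    intro j cf hlen
    have hj : j < cf.length := by omega
    have hdrop : cf.drop j = cf[j] :: cf.drop (j + 1) := List.drop_eq_getElem_cons hj
    have htake : cf.take (j + 1) = cf.take j ++ [cf[j]] := by
      rw [List.take_add_one]
      simp [List.getElem?_eq_getElem hj]
    -- the forward state one step later, componentwise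
    have hstep : fwdAux (cf.take (j + 1)) ((1 : Int), (0 : Int), (0 : Int), (1 : Int))
        = (cf[j] * (fwdAux (cf.take j) (1, 0, 0, 1)).1 + (fwdAux (cf.take j) (1, 0, 0, 1)).2.1,
           (fwdAux (cf.take j) (1, 0, 0, 1)).1,
           cf[j] * (fwdAux (cf.take j) (1, 0, 0, 1)).2.2.1 + (fwdAux (cf.take j) (1, 0, 0, 1)).2.2.2,
           (fwdAux (cf.take j) (1, 0, 0, 1)).2.2.1) := by
      rw [htake]
      unfold fwdAux
      rw [List.foldl_append]
      rfl
    have hfb := fwd_back (cf.take j) cf[j] 1 0 0 1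
    rw [← htake] at hfb
    rw [hstep] at hfb
    have hp : cf[j] * (fwdAux (cf.take j) (1, 0, 0, 1)).1 + (fwdAux (cf.take j) (1, 0, 0, 1)).2.1
        = (backEval (cf.take j) cf[j]).1 := by have := hfb.1; simpa using this
    have hk : cf[j] * (fwdAux (cf.take j) (1, 0, 0, 1)).2.2.1 + (fwdAux (cf.take j) (1, 0, 0, 1)).2.2.2
        = (backEval (cf.take j) cf[j]).2 := by have := hfb.2; simpa using this
    rw [List.range'_succ, hdrop, wienerLoopA, wienerLoopB]
    simp only [backPair_eq cf j hj, check_eq, hp, hk]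
    cases wienerCheckB n e (backEval (cf.take j) cf[j]).1 (backEval (cf.take j) cf[j]).2 with
    | some r => rfl
    | none =>
      have h2 := ih (j + 1) cf (by omega)
      rw [hstep] at h2
      rw [hp, hk] at h2
      exact h2

-- ===== VERDICT (by name: the statement is the Claim_ definition above) =====
theorem wiener_attack_spec : Claim_equal_wiener_attack := by
  intro n e _
  unfold Spec_wiener_attack wiener_attack wiener_attack_alt
  rw [cfQuotients_eq n.natAbs e n rfl]
  have h := loops n e (cfExpansion e n).length 0 (cfExpansion e n) (by omega)
  simpa [fwdAux, List.range_eq_range'] using h
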